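-- pv_equiv track=rewrite | github.com/doyaGu/Clobber | clobber_standard.py | again
-- ===== SOURCE A (Python) =====
-- def isInBoard(n, p, x, y):
--     return 0 <= x < n and 0 <= y < p
--
-- def index(board, coordinate):
--     return board[coordinate[1]][coordinate[0]]
--
-- def scope(coordinate):
--     i, j = coordinate
--     xs, ys = (i - 1, i + 1, i, i), (j, j, j - 1, j + 1)
--     for i in range(4):
--         yield xs[i], ys[i]
--
-- def getNeighbors(n, p, coordinate):
--     neighbors = []
--     for x, y in scope(coordinate):
--             if isInBoard(n, p, x, y):
--                 neighbors.append((x, y))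
--     return neighbors
--
-- def again(board, n, p, player):
--     continuance = False
--     adversary = 2 if player == 1 else 1
--     board_index = [(x, y) for x in range(n) for y in range(p)]
--     for i in board_index:
--         if index(board, i) == player:
--             for neighbor in getNeighbors(n, p, i):
--                 if index(board, neighbor) == adversary:
--                     continuance = True
--     return continuance
-- ===== SOURCE B (Python) =====
-- def again(board, n, p, player):
--     if n <= 0 or p <= 0:
--         return False
--     adversary = 2 if player == 1 else 1
--     pairs = ((player, adversary), (adversary, player))
--     # crop the board to the n x p playing area, then compare it against its own
--     # horizontal and vertical shifts: an adjacency is a (player, adversary) pair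
--     # in zip(row, row[1:]) or in zip(row, next_row)
--     rows = [row[:n] for row in board[:p]]
--     for row in rows:
--         for ab in zip(row, row[1:]):
--             if ab in pairs:
--                 return True
--     for up, low in zip(rows, rows[1:]):
--         for ab in zip(up, low):
--             if ab in pairs:
--                 return True
--     return False
-- ===== Notes on version B (the rewrite author's own statement) =====
-- stated objective: alternative
-- what changed: B crops the board to the n-by-p area once, then detects adjacency by comparing the grid against its own shifts - zipping each row with its tail and each row with the next row in two staged passes with early return - instead of A's coordinate loop that looks up the four neighbors of every player cell via index arithmetic and bounds tests.
import Mathlib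
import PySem

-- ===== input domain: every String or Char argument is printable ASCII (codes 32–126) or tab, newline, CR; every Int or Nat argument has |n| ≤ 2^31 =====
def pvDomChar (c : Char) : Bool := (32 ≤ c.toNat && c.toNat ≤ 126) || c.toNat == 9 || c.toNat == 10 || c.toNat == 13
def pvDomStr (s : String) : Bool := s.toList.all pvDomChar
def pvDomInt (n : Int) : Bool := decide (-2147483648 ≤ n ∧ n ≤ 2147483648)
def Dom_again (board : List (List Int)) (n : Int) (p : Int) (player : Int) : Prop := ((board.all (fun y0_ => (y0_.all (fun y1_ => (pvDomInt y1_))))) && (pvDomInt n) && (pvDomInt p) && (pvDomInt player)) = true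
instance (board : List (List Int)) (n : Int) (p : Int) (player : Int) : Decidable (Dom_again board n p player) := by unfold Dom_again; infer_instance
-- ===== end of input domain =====

-- B crops the board to the n×p area once and detects adjacency by zipping the grid with its own
-- horizontal and vertical shifts (two staged passes), instead of A's per-player-cell 4-neighbour
-- scan with index arithmetic and bounds tests (alternative decomposition).

-- ===== PORT A =====
def isInBoard (n p x y : Int) : Bool := decide (0 ≤ x ∧ x < n) && decide (0 ≤ y ∧ y < p)

def indexP (board : List (List Int)) (c : Int × Int) : Int :=
  PySem.List.pyGetD (PySem.List.pyGetD board c.2 []) c.1 0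

def scopeL (c : Int × Int) : List (Int × Int) :=
  [(c.1 - 1, c.2), (c.1 + 1, c.2), (c.1, c.2 - 1), (c.1, c.2 + 1)]

def getNeighbors (n p : Int) (c : Int × Int) : List (Int × Int) :=
  (scopeL c).foldl (fun acc xy => if isInBoard n p xy.1 xy.2 then acc ++ [xy] else acc) []

def again (board : List (List Int)) (n : Int) (p : Int) (player : Int) : Bool :=
  let adversary : Int := if player == 1 then 2 else 1
  let board_index := (PySem.List.pyRange 0 n 1).flatMap
    (fun x => (PySem.List.pyRange 0 p 1).map (fun y => (x, y)))
  board_index.foldl (fun continuance i =>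
    if indexP board i == player then
      (getNeighbors n p i).foldl
        (fun c nb => if indexP board nb == adversary then true else c) continuance
    else continuance) false

-- ===== PORT B =====
def pairHitB (player adversary : Int) (ab : Int × Int) : Bool :=
  ab == (player, adversary) || ab == (adversary, player)

def again_alt (board : List (List Int)) (n : Int) (p : Int) (player : Int) : Bool :=
  if n ≤ 0 ∨ p ≤ 0 then false else
  let adversary : Int := if player == 1 then 2 else 1
  -- Python slices board[:p] / row[:n] ported with PySem.List.slice (exact)
  let rows := (PySem.List.slice board none (some p)).map
    (fun row => PySem.List.slice row none (some n))
  if rows.any (fun row => (row.zip (row.drop 1)).any (pairHitB player adversary)) then true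
  else (rows.zip (rows.drop 1)).any (fun ul => (ul.1.zip ul.2).any (pairHitB player adversary))

-- ===== PRECONDITION & SPEC =====
-- Pre_ excludes exactly the inputs where Python A raises IndexError: a positive n×p scan over a
-- board with fewer than p rows, or with a row among the first p shorter than n.
def Pre_again (board : List (List Int)) (n : Int) (p : Int) (player : Int) : Prop :=
  0 < n → 0 < p → (p ≤ (board.length : Int) ∧ ∀ row ∈ board.take p.toNat, n ≤ (row.length : Int))
instance (board : List (List Int)) (n : Int) (p : Int) (player : Int) : Decidable (Pre_again board n p player) := by unfold Pre_again; infer_instance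

def pvWitness_again : List (List Int) × Int × Int × Int := ([[1, 2], [0, 0]], 2, 2, 1)

def Spec_again (board : List (List Int)) (n : Int) (p : Int) (player : Int) (out : Bool) : Prop := out = again_alt board n p player
instance (board : List (List Int)) (n : Int) (p : Int) (player : Int) (out : Bool) : Decidable (Spec_again board n p player out) := by unfold Spec_again; infer_instance

-- ===== CLAIM (what is proved, stated in full; the proofs are below) =====
def Claim_equal_again : Prop := ∀ (board : List (List Int)) (n : Int) (p : Int) (player : Int), Dom_again board n p player → Pre_again board n p player → Spec_again board n p player (again board n p player)

-- ===== LEMMAS AND PROOFS =====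

-- proof-only helpers: the per-cell neighbour test of A, rewritten as one boolean 'any' form
def cellB (board : List (List Int)) (x y : Int) : Int :=
  PySem.List.pyGetD (PySem.List.pyGetD board y []) x 0

def edgeHit (c d player adversary : Int) : Bool :=
  (c == player && d == adversary) || (c == adversary && d == player)

def againAny (board : List (List Int)) (n : Int) (p : Int) (player : Int) : Bool :=
  if n ≤ 0 then false else
  let adversary : Int := if player == 1 then 2 else 1
  (PySem.List.pyRange 0 p 1).any (fun y =>
    (PySem.List.pyRange 0 n 1).any (fun x =>
      let c := cellB board x y
      (decide (x + 1 < n) && edgeHit c (cellB board (x + 1) y) player adversary) ||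
      (decide (y + 1 < p) && edgeHit c (cellB board x (y + 1)) player adversary)))

-- the 'if hit then set flag else keep' loop body, rewritten to the one-test shape
theorem step_eq {α : Type} (c1 Q : α → Bool) :
    (fun (ok : Bool) i => if c1 i then ok || Q i else ok)
      = (fun (ok : Bool) i => if c1 i && Q i then true else ok) := by
  funext ok i
  cases h1 : c1 i <;> cases h2 : Q i <;> cases ok <;> simp [*]

theorem getNeighbors_eq (n p : Int) (c : Int × Int) :
    getNeighbors n p c = (scopeL c).filter (fun xy => isInBoard n p xy.1 xy.2) := by
  simp [getNeighbors, PySem.List.foldl_append_if_eq_filter]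

theorem again_eq_any (board : List (List Int)) (n p player : Int) :
    again board n p player = againAny board n p player := by
  unfold again againAny
  by_cases hn : n ≤ 0
  · simp [PySem.List.pyRange_one_eq_nil hn]
  simp only [if_neg hn]
  simp only [PySem.List.foldl_if_true_eq, step_eq, getNeighbors_eq, List.any_filter]
  rw [Bool.eq_iff_iff]
  simp only [Bool.false_or, List.any_eq_true, List.mem_flatMap, List.mem_map,
    PySem.List.mem_pyRange_one, scopeL, isInBoard, indexP, cellB, edgeHit,
    List.any_cons, List.any_nil, Bool.and_eq_true, Bool.or_eq_true,
    decide_eq_true_eq, beq_iff_eq, Bool.false_eq_true, or_false]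
  constructor
  · rintro ⟨i, ⟨x, ⟨hx0, hxn⟩, y, ⟨hy0, hyp⟩, rfl⟩, hcell, hnb⟩
    dsimp only at hcell hnb
    rcases hnb with ⟨⟨⟨h1a, h1b⟩, _⟩, hadv⟩ | ⟨⟨⟨h2a, h2b⟩, _⟩, hadv⟩ |
      ⟨⟨_, h3a, h3b⟩, hadv⟩ | ⟨⟨_, h4a, h4b⟩, hadv⟩
    · refine ⟨y, ⟨hy0, hyp⟩, x - 1, ⟨h1a, by omega⟩, Or.inl ⟨by omega, Or.inr ⟨hadv, ?_⟩⟩⟩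
      rw [show x - 1 + 1 = x by ring]; exact hcell
    · exact ⟨y, ⟨hy0, hyp⟩, x, ⟨hx0, hxn⟩, Or.inl ⟨h2b, Or.inl ⟨hcell, hadv⟩⟩⟩
    · refine ⟨y - 1, ⟨h3a, by omega⟩, x, ⟨hx0, hxn⟩, Or.inr ⟨by omega, Or.inr ⟨hadv, ?_⟩⟩⟩
      rw [show y - 1 + 1 = y by ring]; exact hcell
    · exact ⟨y, ⟨hy0, hyp⟩, x, ⟨hx0, hxn⟩, Or.inr ⟨h4b, Or.inl ⟨hcell, hadv⟩⟩⟩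
  · rintro ⟨y, ⟨hy0, hyp⟩, x, ⟨hx0, hxn⟩, hhit⟩
    rcases hhit with ⟨hx1, ⟨hc, hd⟩ | ⟨hc, hd⟩⟩ | ⟨hy1, ⟨hc, hd⟩ | ⟨hc, hd⟩⟩
    · exact ⟨(x, y), ⟨x, ⟨hx0, hxn⟩, y, ⟨hy0, hyp⟩, rfl⟩, hc,
        Or.inr (Or.inl ⟨⟨⟨by omega, hx1⟩, hy0, hyp⟩, hd⟩)⟩
    · refine ⟨(x + 1, y), ⟨x + 1, ⟨by omega, hx1⟩, y, ⟨hy0, hyp⟩, rfl⟩, hd,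
        Or.inl ⟨⟨⟨by omega, by omega⟩, hy0, hyp⟩, ?_⟩⟩
      dsimp only
      rw [show x + 1 - 1 = x by ring]; exact hc
    · exact ⟨(x, y), ⟨x, ⟨hx0, hxn⟩, y, ⟨hy0, hyp⟩, rfl⟩, hc,
        Or.inr (Or.inr (Or.inr ⟨⟨⟨hx0, hxn⟩, by omega, hy1⟩, hd⟩))⟩
    · refine ⟨(x, y + 1), ⟨x, ⟨hx0, hxn⟩, y + 1, ⟨by omega, hy1⟩, rfl⟩, hd,
        Or.inr (Or.inr (Or.inl ⟨⟨⟨hx0, hxn⟩, by omega, by omega⟩, ?_⟩))⟩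
      dsimp only
      rw [show y + 1 - 1 = y by ring]; exact hc

theorem pairHitB_eq (player adversary : Int) (ab : Int × Int) :
    pairHitB player adversary ab = edgeHit ab.1 ab.2 player adversary := by
  rfl

-- membership in 'l.zip l'' as a two-sided index fact
theorem exists_zip_iff {α : Type} (l l' : List α) (P : α × α → Prop) :
    (∃ ab ∈ l.zip l', P ab) ↔
      ∃ i : Nat, ∃ h : i < min l.length l'.length,
        P (l[i]'(by omega), l'[i]'(by omega)) := by
  constructor
  · rintro ⟨ab, hmem, hf⟩
    rw [List.mem_iff_getElem] at hmem
    obtain ⟨i, hi, hab⟩ := hmem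
    subst hab
    rw [List.getElem_zip] at hf
    rw [List.length_zip] at hi
    exact ⟨i, hi, hf⟩
  · rintro ⟨i, hi, hf⟩
    refine ⟨(l.zip l')[i]'(by rw [List.length_zip]; exact hi), List.getElem_mem _, ?_⟩
    rw [List.getElem_zip]
    exact hf

theorem anyAny_eq_alt (board : List (List Int)) (n p player : Int)
    (h : Pre_again board n p player) :
    againAny board n p player = again_alt board n p player := by
  unfold againAny again_alt
  by_cases hn : n ≤ 0
  · simp [hn]
  by_cases hp : p ≤ 0
  · simp [hp, PySem.List.pyRange_one_eq_nil hp]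
  simp only [if_neg hn, if_neg (show ¬ (n ≤ 0 ∨ p ≤ 0) by omega)]
  obtain ⟨hplen, hrows⟩ := h (by omega) (by omega)
  simp only [PySem.List.slice_to _ (show (0:Int) ≤ p by omega),
    PySem.List.slice_to _ (show (0:Int) ≤ n by omega)]
  set adversary : Int := if player == 1 then 2 else 1 with hadv
  set rows : List (List Int) := (board.take p.toNat).map (fun row => row.take n.toNat) with hrowsdef
  -- facts about rows
  have hlen : rows.length = p.toNat := by
    simp [hrowsdef]; omega
  have hrlen : ∀ (j : Nat) (hj : j < rows.length), (rows[j]'hj).length = n.toNat := by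
    intro j hj
    have hj' : j < (board.take p.toNat).length := by simpa [hrowsdef] using hj
    have hmem : (board.take p.toNat)[j]'hj' ∈ board.take p.toNat := List.getElem_mem _
    have := hrows _ hmem
    simp only [hrowsdef, List.getElem_map, List.length_take]
    have : n ≤ ((board.take p.toNat)[j]'hj').length := by exact_mod_cast this
    omega
  have hcell : ∀ (j i : Nat), j < p.toNat → i < n.toNat →
      ∀ (hj : j < rows.length) (hi : i < (rows[j]'hj).length),
      (rows[j]'hj)[i]'hi = cellB board (i : Int) (j : Int) := by
    intro j i hjp hin hj hi
    have hjb : j < board.length := by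
      have : (p.toNat : Int) ≤ (board.length : Int) := by omega
      omega
    have hrowlen : n ≤ ((board[j]'hjb).length : Int) := by
      apply hrows
      rw [List.mem_take_iff_getElem]
      exact ⟨j, by omega, by simp⟩
    have hib : i < (board[j]'hjb).length := by omega
    simp only [hrowsdef, List.getElem_map, List.getElem_take, cellB]
    rw [PySem.List.pyGetD_eq_getElem _ [] (by omega) (by exact_mod_cast hjb)]
    simp only [Int.toNat_natCast]
    rw [PySem.List.pyGetD_eq_getElem _ 0 (by omega) (by exact_mod_cast hib)]
    simp
  -- turn the staged if into ∨ and both sides into existentials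
  rw [Bool.eq_iff_iff]
  have hstage : ∀ a b : Bool, (if a = true then true else b) = (a || b) := by decide
  rw [hstage, Bool.or_eq_true]
  simp only [List.any_eq_true, PySem.List.mem_pyRange_one, Bool.or_eq_true,
    Bool.and_eq_true, decide_eq_true_eq]
  constructor
  · rintro ⟨y, ⟨hy0, hyp⟩, x, ⟨hx0, hxn⟩, hhit⟩
    have hyq : y.toNat < p.toNat := by omega
    have hxm : x.toNat < n.toNat := by omega
    rcases hhit with ⟨hx1, hE⟩ | ⟨hy1, hE⟩
    · -- horizontal
      left
      refine ⟨rows[y.toNat]'(by omega), List.getElem_mem _, ?_⟩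
      rw [exists_zip_iff]
      have hr := hrlen y.toNat (by omega)
      refine ⟨x.toNat, by simp [hr]; omega, ?_⟩
      rw [pairHitB_eq]
      simp only [List.getElem_drop]
      rw [hcell y.toNat x.toNat hyq hxm, hcell y.toNat (1 + x.toNat) hyq (by omega)]
      have e1 : ((x.toNat : Int)) = x := by omega
      have e2 : (((1 + x.toNat : Nat) : Int)) = x + 1 := by omega
      have e3 : ((y.toNat : Int)) = y := by omega
      rw [e1, e2, e3]
      simpa using hE
    · -- vertical
      right
      rw [exists_zip_iff]
      refine ⟨y.toNat, by simp [hlen]; omega, ?_⟩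
      rw [exists_zip_iff]
      simp only [List.getElem_drop]
      have h1 := hrlen y.toNat (by omega)
      have h2 := hrlen (1 + y.toNat) (by omega)
      refine ⟨x.toNat, by simp [h1, h2]; omega, ?_⟩
      rw [pairHitB_eq]
      dsimp only
      rw [hcell y.toNat x.toNat hyq hxm, hcell (1 + y.toNat) x.toNat (by omega) hxm]
      have e1 : ((x.toNat : Int)) = x := by omega
      have e2 : (((1 + y.toNat : Nat) : Int)) = y + 1 := by omega
      have e3 : ((y.toNat : Int)) = y := by omega
      rw [e1, e2, e3]
      simpa using hE
  · rintro (⟨row, hmem, hany⟩ | hvert)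
    · -- horizontal hit
      rw [List.mem_iff_getElem] at hmem
      obtain ⟨j, hj, rfl⟩ := hmem
      rw [exists_zip_iff] at hany
      obtain ⟨i, hi, hf⟩ := hany
      have hr := hrlen j hj
      have him : i + 1 < n.toNat := by
        simp only [List.length_drop, hr] at hi; omega
      rw [pairHitB_eq] at hf
      simp only [List.getElem_drop] at hf
      rw [hcell j i (by omega) (by omega), hcell j (1 + i) (by omega) (by omega)] at hf
      refine ⟨(j : Int), ⟨by omega, by omega⟩, (i : Int), ⟨by omega, by omega⟩,
        Or.inl ⟨by omega, ?_⟩⟩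
      have e2 : (((1 + i : Nat) : Int)) = (i : Int) + 1 := by omega
      rw [e2] at hf
      simpa using hf
    · -- vertical hit
      rw [exists_zip_iff] at hvert
      obtain ⟨j, hj, hf⟩ := hvert
      have hjq : j + 1 < p.toNat := by
        simp only [List.length_drop, hlen] at hj; omega
      rw [exists_zip_iff] at hf
      obtain ⟨i, hi, hf⟩ := hf
      simp only [List.getElem_drop] at hf hi
      have h1 := hrlen j (by omega)
      have h2 := hrlen (1 + j) (by omega)
      have him : i < n.toNat := by
        simp only [h1, h2] at hi; omega
      rw [pairHitB_eq] at hf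
      dsimp only at hf
      rw [hcell j i (by omega) him, hcell (1 + j) i (by omega) him] at hf
      refine ⟨(j : Int), ⟨by omega, by omega⟩, (i : Int), ⟨by omega, by omega⟩,
        Or.inr ⟨by omega, ?_⟩⟩
      have e2 : (((1 + j : Nat) : Int)) = (j : Int) + 1 := by omega
      rw [e2] at hf
      simpa using hf

-- ===== VERDICT (by name: the statement is the Claim_ definition above) =====
theorem again_spec : Claim_equal_again := by
  intro board n p player _ hpre
  unfold Spec_again
  rw [again_eq_any, anyAny_eq_alt board n p player hpre]
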